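-- pv_equiv track=rewrite | github.com/BenMaltby/reqk | MathInterpreter/Success/V1/reqkMathParser.py | operation_sort
-- ===== SOURCE A (Python) =====
-- from operator import itemgetter
--
-- def operation_sort(op_string):
-- 	op_order = ['LPAREN', 'RPAREN', 'FACT', 'EXPO', 'DIV', 'MUL', 'PLUS', 'MINUS']
-- 	op_string_numbered = []
--
-- 	for i in range(len(op_string)):
-- 		for j in range(len(op_order)):
-- 			if op_string[i][0] == op_order[j]:
-- 				op_string_numbered.append([j, op_string[i][1]])
--
-- 	op_string_numbered = sorted(op_string_numbered, key=itemgetter(0))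
--
-- 	for i in range(len(op_string_numbered)):
-- 		op_string[i] = [op_order[op_string_numbered[i][0]], op_string_numbered[i][1]]
--
-- 	return op_string
-- ===== SOURCE B (Python) =====
-- def operation_sort(op_string):
--     precedence = {'LPAREN': 0, 'RPAREN': 1, 'FACT': 2, 'EXPO': 3,
--                   'DIV': 4, 'MUL': 5, 'PLUS': 6, 'MINUS': 7}
--     buckets = [[] for _ in range(8)]
--     for tok in op_string:
--         j = precedence.get(tok[0])
--         if j is not None:
--             buckets[j].append(tok[1])
--     ordered = [[name, v] for name, j in precedence.items() for v in buckets[j]]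
--     op_string[:len(ordered)] = ordered
--     return op_string
-- ===== Notes on version B (the rewrite author's own statement) =====
-- stated objective: alternative
-- what changed: Replaces A's nested scan over the 8-name table plus sorted() with a single pass that classifies each token via a precedence dict into 8 stable buckets, then splices the ordered tokens over the front of the list in place (counting/bucket sort, no comparison sort).
import Mathlib
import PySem

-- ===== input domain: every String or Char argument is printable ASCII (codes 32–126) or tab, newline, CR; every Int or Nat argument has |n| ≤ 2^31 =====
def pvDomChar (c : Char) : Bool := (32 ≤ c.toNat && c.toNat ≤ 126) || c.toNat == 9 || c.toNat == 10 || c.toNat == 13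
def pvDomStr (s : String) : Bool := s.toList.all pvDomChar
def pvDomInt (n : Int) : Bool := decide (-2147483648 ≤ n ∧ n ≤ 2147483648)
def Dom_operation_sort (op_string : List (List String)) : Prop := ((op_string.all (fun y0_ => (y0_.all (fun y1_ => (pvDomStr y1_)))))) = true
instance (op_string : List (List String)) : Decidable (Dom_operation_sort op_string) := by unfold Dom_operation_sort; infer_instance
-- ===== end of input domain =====

-- B replaces A's table scan + comparison sort by a one-pass bucket (counting) sort over the 8
-- precedence classes, splicing the ordered tokens over the front of the list; like A, B mutates
-- its argument in place (the same slots are overwritten), and the equivalence proved is about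
-- the RETURN value.

-- ===== PORT A =====

def opOrder : List String := ["LPAREN", "RPAREN", "FACT", "EXPO", "DIV", "MUL", "PLUS", "MINUS"]

def operation_sort (op_string : List (List String)) : List (List String) :=
  let numbered : List (Int × String) :=
    (PySem.List.pyRange 0 (op_string.length : Int)).foldl (fun acc i =>
      (PySem.List.pyRange 0 (opOrder.length : Int)).foldl (fun acc2 j =>
        if PySem.List.pyGetD (PySem.List.pyGetD op_string i []) 0 "" = PySem.List.pyGetD opOrder j "" then
          acc2 ++ [(j, PySem.List.pyGetD (PySem.List.pyGetD op_string i []) 1 "")]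
        else acc2) acc) []
  let sortedN := PySem.List.sorted numbered (fun p => p.1)
  (PySem.List.pyRange 0 (sortedN.length : Int)).foldl (fun res i =>
    PySem.List.pySetD res i
      [PySem.List.pyGetD opOrder (PySem.List.pyGetD sortedN i (0, "")).1 "",
       (PySem.List.pyGetD sortedN i (0, "")).2]) op_string

-- ===== PORT B =====
-- precedence = {'LPAREN': 0, 'RPAREN': 1, ..., 'MINUS': 7}
def precB : PySem.Dict String Int :=
  PySem.Dict.ofList
    [("LPAREN", 0), ("RPAREN", 1), ("FACT", 2), ("EXPO", 3),
     ("DIV", 4), ("MUL", 5), ("PLUS", 6), ("MINUS", 7)]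

-- loop body: j = precedence.get(tok[0]); if j is not None: buckets[j].append(tok[1])
def bStep (buckets : List (List String)) (tok : List String) : List (List String) :=
  match PySem.Dict.get? precB (PySem.List.pyGetD tok 0 "") with
  | some j => PySem.List.pySetD buckets j (PySem.List.pyGetD buckets j [] ++ [PySem.List.pyGetD tok 1 ""])
  | none => buckets

def operation_sort_alt (op_string : List (List String)) : List (List String) :=
  let buckets := op_string.foldl bStep [[], [], [], [], [], [], [], []]
  let ordered := precB.items.flatMap
    (fun p => (PySem.List.pyGetD buckets p.2 []).map (fun v => [p.1, v]))
  -- op_string[:len(ordered)] = ordered; return op_string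
  ordered ++ op_string.drop ordered.length

-- ===== PRECONDITION & SPEC =====
-- Pre_ excludes exactly the inputs where Python A raises IndexError: an empty inner list
-- (op_string[i][0]) or an operator token of length 1 (op_string[i][1]); B raises there too.
def Pre_operation_sort (op_string : List (List String)) : Prop :=
  ∀ t ∈ op_string, t ≠ [] ∧
    (t.getD 0 "" ∈ (["LPAREN", "RPAREN", "FACT", "EXPO", "DIV", "MUL", "PLUS", "MINUS"] : List String) → 2 ≤ t.length)
instance (op_string : List (List String)) : Decidable (Pre_operation_sort op_string) := by
  unfold Pre_operation_sort; infer_instance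

def pvWitness_operation_sort : List (List String) :=
  [["PLUS", "3"], ["num", "5"], ["MUL", "x"], ["PLUS", "7"]]

def Spec_operation_sort (op_string : List (List String)) (out : List (List String)) : Prop := out = operation_sort_alt op_string
instance (op_string : List (List String)) (out : List (List String)) : Decidable (Spec_operation_sort op_string out) := by unfold Spec_operation_sort; infer_instance

-- ===== CLAIM (what is proved, stated in full; the proofs are below) =====
def Claim_equal_operation_sort : Prop := ∀ (op_string : List (List String)), Dom_operation_sort op_string → Pre_operation_sort op_string → Spec_operation_sort op_string (operation_sort op_string)

-- ===== LEMMAS AND PROOFS =====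

-- class of a token head: its precedence index, if any (B's dict lookup)
def cls (s : String) : Option Int := PySem.Dict.get? precB s

-- the entry A's inner scan appends for a token
def ent (t : List String) : List (Int × String) :=
  match cls (PySem.List.pyGetD t 0 "") with
  | some j => [(j, PySem.List.pyGetD t 1 "")]
  | none => []

def num (l : List (List String)) : List (Int × String) := l.flatMap ent

def fil (j : Int) (ns : List (Int × String)) : List (Int × String) :=
  ns.filter (fun p => decide (p.1 = j))

-- bucket j's value list
def V (j : Int) (l : List (List String)) : List String := (fil j (num l)).map Prod.snd

theorem precB_items : precB.items =
    [("LPAREN", 0), ("RPAREN", 1), ("FACT", 2), ("EXPO", 3), ("DIV", 4), ("MUL", 5), ("PLUS", 6), ("MINUS", 7)] := by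
  decide

theorem cls_eq (s : String) : cls s =
    if s = "LPAREN" then some 0 else if s = "RPAREN" then some 1 else if s = "FACT" then some 2
    else if s = "EXPO" then some 3 else if s = "DIV" then some 4 else if s = "MUL" then some 5
    else if s = "PLUS" then some 6 else if s = "MINUS" then some 7 else none := by
  by_cases h0 : s = "LPAREN"; · subst h0; rfl
  by_cases h1 : s = "RPAREN"; · subst h1; rfl
  by_cases h2 : s = "FACT";   · subst h2; rfl
  by_cases h3 : s = "EXPO";   · subst h3; rfl
  by_cases h4 : s = "DIV";    · subst h4; rfl
  by_cases h5 : s = "MUL";    · subst h5; rfl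
  by_cases h6 : s = "PLUS";   · subst h6; rfl
  by_cases h7 : s = "MINUS";  · subst h7; rfl
  simp only [h0, h1, h2, h3, h4, h5, h6, h7, if_false]
  unfold cls
  simp only [PySem.Dict.get?]
  rw [precB_items]
  rw [List.find?_cons_of_neg (by simp [Ne.symm h0]), List.find?_cons_of_neg (by simp [Ne.symm h1]),
      List.find?_cons_of_neg (by simp [Ne.symm h2]), List.find?_cons_of_neg (by simp [Ne.symm h3]),
      List.find?_cons_of_neg (by simp [Ne.symm h4]), List.find?_cons_of_neg (by simp [Ne.symm h5]),
      List.find?_cons_of_neg (by simp [Ne.symm h6]), List.find?_cons_of_neg (by simp [Ne.symm h7]),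
      List.find?_nil]
  rfl

theorem cls_range (s : String) (j : Int) (h : cls s = some j) : 0 ≤ j ∧ j < 8 := by
  rw [cls_eq] at h
  split_ifs at h <;> simp_all <;> omega

theorem fil_mem {j : Int} {ns : List (Int × String)} {p : Int × String} (h : p ∈ fil j ns) :
    p.1 = j := by
  simp [fil, List.mem_filter] at h; exact h.2

theorem ent_len (t : List String) : (ent t).length ≤ 1 := by
  unfold ent; cases cls (PySem.List.pyGetD t 0 "") <;> simp

theorem num_len_le (l : List (List String)) : (num l).length ≤ l.length := by
  induction l with
  | nil => simp [num]
  | cons t l ih =>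
      have h1 := ent_len t
      simp only [num, List.flatMap_cons, List.length_append, List.length_cons] at *
      omega

theorem num_key_bound (l : List (List String)) (p : Int × String) (h : p ∈ num l) :
    0 ≤ p.1 ∧ p.1 < 8 := by
  simp only [num, List.mem_flatMap] at h
  obtain ⟨t, -, hp⟩ := h
  unfold ent at hp
  rcases hc : cls (PySem.List.pyGetD t 0 "") with _ | j <;> rw [hc] at hp
  · simp at hp
  · simp at hp
    exact hp ▸ cls_range _ _ hc

-- A's inner scan over the 8 names appends exactly `ent t`
theorem innerA (acc : List (Int × String)) (t : List String) :
    (PySem.List.pyRange 0 (opOrder.length : Int)).foldl (fun acc2 j =>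
      if PySem.List.pyGetD t 0 "" = PySem.List.pyGetD opOrder j "" then
        acc2 ++ [(j, PySem.List.pyGetD t 1 "")]
      else acc2) acc = acc ++ ent t := by
  have hr : PySem.List.pyRange 0 ((opOrder.length : Int)) = [0,1,2,3,4,5,6,7] := by rfl
  rw [hr]
  unfold ent
  rw [cls_eq]
  simp only [List.foldl]
  have e0 : PySem.List.pyGetD opOrder (0:Int) "" = "LPAREN" := rfl
  have e1 : PySem.List.pyGetD opOrder (1:Int) "" = "RPAREN" := rfl
  have e2 : PySem.List.pyGetD opOrder (2:Int) "" = "FACT" := rfl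
  have e3 : PySem.List.pyGetD opOrder (3:Int) "" = "EXPO" := rfl
  have e4 : PySem.List.pyGetD opOrder (4:Int) "" = "DIV" := rfl
  have e5 : PySem.List.pyGetD opOrder (5:Int) "" = "MUL" := rfl
  have e6 : PySem.List.pyGetD opOrder (6:Int) "" = "PLUS" := rfl
  have e7 : PySem.List.pyGetD opOrder (7:Int) "" = "MINUS" := rfl
  rw [e0, e1, e2, e3, e4, e5, e6, e7]
  by_cases h0 : PySem.List.pyGetD t 0 "" = "LPAREN"; · simp [h0]
  by_cases h1 : PySem.List.pyGetD t 0 "" = "RPAREN"; · simp [h0, h1]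
  by_cases h2 : PySem.List.pyGetD t 0 "" = "FACT";   · simp [h0, h1, h2]
  by_cases h3 : PySem.List.pyGetD t 0 "" = "EXPO";   · simp [h0, h1, h2, h3]
  by_cases h4 : PySem.List.pyGetD t 0 "" = "DIV";    · simp [h0, h1, h2, h3, h4]
  by_cases h5 : PySem.List.pyGetD t 0 "" = "MUL";    · simp [h0, h1, h2, h3, h4, h5]
  by_cases h6 : PySem.List.pyGetD t 0 "" = "PLUS";   · simp [h0, h1, h2, h3, h4, h5, h6]
  by_cases h7 : PySem.List.pyGetD t 0 "" = "MINUS";  · simp [h0, h1, h2, h3, h4, h5, h6, h7]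
  simp [h0, h1, h2, h3, h4, h5, h6, h7]

-- stable-insertion facts
theorem ins_all_lt (x : Int × String) (zs : List (Int × String))
    (h2 : ∀ y ∈ zs, x.1 < y.1) :
    PySem.List.insertBy (fun a b => decide ((a : Int × String).1 < b.1)) x zs = x :: zs := by
  cases zs with
  | nil => rfl
  | cons z zs =>
      have : x.1 < z.1 := h2 z (by simp)
      simp [PySem.List.insertBy, this]

theorem ins_split (x : Int × String) (ys zs : List (Int × String))
    (h1 : ∀ y ∈ ys, ¬ x.1 < y.1) (h2 : ∀ y ∈ zs, x.1 < y.1) :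
    PySem.List.insertBy (fun a b => decide ((a : Int × String).1 < b.1)) x (ys ++ zs)
      = ys ++ x :: zs := by
  induction ys with
  | nil => simpa using ins_all_lt x zs h2
  | cons y ys ih =>
      have hy : ¬ x.1 < y.1 := h1 y (by simp)
      simp only [List.cons_append]
      rw [show PySem.List.insertBy (fun a b => decide ((a : Int × String).1 < b.1)) x (y :: (ys ++ zs))
            = y :: PySem.List.insertBy (fun a b => decide ((a : Int × String).1 < b.1)) x (ys ++ zs) by
          simp [PySem.List.insertBy, hy]]
      rw [ih (fun y hy' => h1 y (by simp [hy']))]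

theorem ins_skip (x : Int × String) (ys zs : List (Int × String))
    (h1 : ∀ y ∈ ys, ¬ x.1 < y.1) :
    PySem.List.insertBy (fun a b => decide ((a : Int × String).1 < b.1)) x (ys ++ zs)
      = ys ++ PySem.List.insertBy (fun a b => decide ((a : Int × String).1 < b.1)) x zs := by
  induction ys with
  | nil => simp
  | cons y ys ih =>
      have hy : ¬ x.1 < y.1 := h1 y (by simp)
      simp only [List.cons_append]
      rw [show PySem.List.insertBy (fun a b => decide ((a : Int × String).1 < b.1)) x (y :: (ys ++ zs))
            = y :: PySem.List.insertBy (fun a b => decide ((a : Int × String).1 < b.1)) x (ys ++ zs) by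
          simp [PySem.List.insertBy, hy]]
      rw [ih (fun y hy' => h1 y (by simp [hy']))]

def cat (is : List Int) (ns : List (Int × String)) : List (Int × String) :=
  (is.map (fun i => fil i ns)).flatten

theorem mem_cat {is : List Int} {ns : List (Int × String)} {p : Int × String}
    (h : p ∈ cat is ns) : p.1 ∈ is := by
  simp only [cat, List.mem_flatten, List.mem_map] at h
  obtain ⟨l, ⟨i, hi, rfl⟩, hp⟩ := h
  exact (fil_mem hp) ▸ hi

theorem ins_cat (x : Int × String) (is : List Int) (ns : List (Int × String))
    (hs : is.Pairwise (· < ·)) (hmem : x.1 ∈ is) :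
    PySem.List.insertBy (fun a b => decide ((a : Int × String).1 < b.1)) x (cat is ns)
      = (is.map (fun i => fil i ns ++ if x.1 = i then [x] else [])).flatten := by
  induction is with
  | nil => simp at hmem
  | cons i is ih =>
      simp only [cat, List.map_cons, List.flatten_cons]
      by_cases hxi : x.1 = i
      · rw [ins_split x (fil i ns) ((is.map (fun i => fil i ns)).flatten)
              (fun y hy => by rw [fil_mem hy]; omega)
              (fun y hy => by
                have := mem_cat (is := is) (ns := ns) (p := y) hy
                have := (List.pairwise_cons.mp hs).1 y.1 this
                omega)]
        have hne : ∀ i' ∈ is, ¬ x.1 = i' := by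
          intro i' hi'
          have := (List.pairwise_cons.mp hs).1 i' hi'
          omega
        have hm : (is.map (fun i' => fil i' ns ++ if x.1 = i' then [x] else []))
            = is.map (fun i' => fil i' ns) :=
          List.map_congr_left (fun i' hi' => by rw [if_neg (hne i' hi')]; simp)
        rw [hm, if_pos hxi]
        simp [List.append_assoc]
      · have hxmem : x.1 ∈ is := (List.mem_cons.mp hmem).resolve_left hxi
        have hgt : i < x.1 := (List.pairwise_cons.mp hs).1 x.1 hxmem
        rw [ins_skip x (fil i ns) _ (fun y hy => by rw [fil_mem hy]; omega)]
        rw [show PySem.List.insertBy (fun a b => decide ((a : Int × String).1 < b.1)) x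
              ((is.map (fun i => fil i ns)).flatten) = _ from ih (List.pairwise_cons.mp hs).2 hxmem]
        simp [hxi]

-- stable sort by an 8-valued key is the concatenation of the 8 buckets
theorem sorted_buckets (ns : List (Int × String)) (h : ∀ p ∈ ns, 0 ≤ p.1 ∧ p.1 < 8) :
    PySem.List.sorted ns (fun p => p.1)
      = fil 0 ns ++ fil 1 ns ++ fil 2 ns ++ fil 3 ns ++ fil 4 ns ++ fil 5 ns ++ fil 6 ns ++ fil 7 ns := by
  have main : List.foldl (fun acc x => PySem.List.insertBy (fun a b => decide ((a : Int × String).1 < b.1)) x acc) [] ns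
      = cat [0,1,2,3,4,5,6,7] ns := by
    induction ns using List.reverseRecOn with
    | nil => rfl
    | append_singleton ns x ih =>
        rw [List.foldl_append, List.foldl_cons, List.foldl_nil,
            ih (fun p hp => h p (by simp [hp]))]
        have hx := h x (by simp)
        rw [ins_cat x [0,1,2,3,4,5,6,7] ns (by norm_num) (by simp; omega)]
        have hfil : ∀ i : Int, fil i (ns ++ [x]) = fil i ns ++ (if x.1 = i then [x] else []) := by
          intro i; simp [fil, List.filter_append]; split_ifs with hh <;> simp [hh]
        simp only [cat, List.map_cons, List.map_nil]
        rw [hfil 0, hfil 1, hfil 2, hfil 3, hfil 4, hfil 5, hfil 6, hfil 7]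
  rw [PySem.List.sorted_eq_foldl_insertBy, main]
  simp [cat, List.append_assoc]

-- A's write-back loop overwrites the first ds.length slots with the decoded entries
theorem write_loop {α : Type} (g : α → List String) (d : α) (ds : List α) :
    ∀ xs : List (List String), ds.length ≤ xs.length →
    (PySem.List.pyRange 0 (ds.length : Int)).foldl (fun res i =>
        PySem.List.pySetD res i (g (PySem.List.pyGetD ds i d))) xs
      = ds.map g ++ xs.drop ds.length := by
  induction ds using List.reverseRecOn with
  | nil => intro xs h; simp
  | append_singleton ds e ih =>
      intro xs h
      have hlen : ((ds ++ [e]).length : Int) = (ds.length : Int) + 1 := by simp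
      rw [hlen, PySem.List.pyRange_one_succ_right (by positivity), List.foldl_append]
      have hinner : (PySem.List.pyRange 0 (ds.length : Int)).foldl (fun res i =>
            PySem.List.pySetD res i (g (PySem.List.pyGetD (ds ++ [e]) i d))) xs
          = ds.map g ++ xs.drop ds.length := by
        rw [PySem.List.foldl_congr_mem (PySem.List.pyRange 0 (ds.length : Int)) _
              (fun res i => PySem.List.pySetD res i (g (PySem.List.pyGetD ds i d))) xs
              (fun res i hi => by
                have hb := PySem.List.mem_pyRange_one.mp hi
                have h1 := PySem.List.pyGetD_eq_getElem (ds ++ [e]) (i := i) d hb.1 (by simp; omega)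
                have h2 := PySem.List.pyGetD_eq_getElem ds (i := i) d hb.1 (by omega)
                simp only [h1, h2]
                rw [List.getElem_append_left (by omega)])]
        exact ih xs (by simp at h; omega)
      rw [hinner]
      simp only [List.foldl_cons, List.foldl_nil]
      have hget : PySem.List.pyGetD (ds ++ [e]) ((ds.length : Int)) d = e := by
        rw [PySem.List.pyGetD_eq_getElem _ _ (by positivity) (by simp)]
        simp
      rw [hget]
      have hset : PySem.List.pySetD (ds.map g ++ xs.drop ds.length) ((ds.length : Int)) (g e)
          = ds.map g ++ [g e] ++ xs.drop (ds.length + 1) := by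
        rw [PySem.List.pySetD_natCast]
        rw [List.set_append_right _ _ (by simp)]
        rw [List.drop_eq_getElem_cons (show ds.length < xs.length by simp at h; omega)]
        simp only [List.length_map, Nat.sub_self, List.set_cons_zero]
        simp [List.append_assoc]
      rw [hset]
      simp [List.append_assoc]

theorem V_cons (i : Int) (t : List String) (l : List (List String)) :
    V i (t :: l) = ((ent t).filter (fun p => decide (p.1 = i))).map Prod.snd ++ V i l := by
  simp [V, num, fil, List.filter_append]

-- B's fold invariant
theorem foldB (l : List (List String)) :
    ∀ (b0 b1 b2 b3 b4 b5 b6 b7 : List String),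
    l.foldl bStep [b0, b1, b2, b3, b4, b5, b6, b7]
      = [b0 ++ V 0 l, b1 ++ V 1 l, b2 ++ V 2 l, b3 ++ V 3 l,
         b4 ++ V 4 l, b5 ++ V 5 l, b6 ++ V 6 l, b7 ++ V 7 l] := by
  induction l with
  | nil => intro b0 b1 b2 b3 b4 b5 b6 b7; simp [V, num, fil]
  | cons t l ih =>
      intro b0 b1 b2 b3 b4 b5 b6 b7
      rw [List.foldl_cons]
      rcases hcls : cls (PySem.List.pyGetD t 0 "") with _ | j
      · have hb : bStep [b0, b1, b2, b3, b4, b5, b6, b7] t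
            = [b0, b1, b2, b3, b4, b5, b6, b7] := by
          simp [bStep, show PySem.Dict.get? precB (PySem.List.pyGetD t 0 "") = none from hcls]
        rw [hb, ih]
        simp [V_cons, ent, hcls, num]
      · have hj := cls_range _ _ hcls
        have hj' : j = 0 ∨ j = 1 ∨ j = 2 ∨ j = 3 ∨ j = 4 ∨ j = 5 ∨ j = 6 ∨ j = 7 := by omega
        have hb : bStep [b0, b1, b2, b3, b4, b5, b6, b7] t
            = PySem.List.pySetD [b0, b1, b2, b3, b4, b5, b6, b7] j
                (PySem.List.pyGetD [b0, b1, b2, b3, b4, b5, b6, b7] j [] ++ [PySem.List.pyGetD t 1 ""]) := by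
          simp [bStep, show PySem.Dict.get? precB (PySem.List.pyGetD t 0 "") = some j from hcls]
        rw [hb]
        have he : ent t = [(j, PySem.List.pyGetD t 1 "")] := by simp [ent, hcls]
        rcases hj' with rfl|rfl|rfl|rfl|rfl|rfl|rfl|rfl <;>
        · rw [PySem.List.pySetD_of_nonneg _ _ (by norm_num)]
          simp only [PySem.List.pyGetD_ofNat']
          simp only [List.getD_cons_zero, List.getD_cons_succ, Int.reduceToNat, List.set]
          rw [ih]
          simp [V_cons, he, List.append_assoc, PySem.List.pyGetD_ofNat']

theorem map_g_fil (j : Int) (nm : String) (hnm : PySem.List.pyGetD opOrder j "" = nm)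
    (ns : List (Int × String)) :
    (fil j ns).map (fun p => [PySem.List.pyGetD opOrder p.1 "", p.2])
      = ((fil j ns).map Prod.snd).map (fun v => [nm, v]) := by
  rw [List.map_map]
  exact List.map_congr_left (fun p hp => by simp only [Function.comp]; rw [fil_mem hp, hnm])

-- ===== VERDICT (by name: the statement is the Claim_ definition above) =====
theorem operation_sort_spec : Claim_equal_operation_sort := by
  intro l _ _
  unfold Spec_operation_sort
  show operation_sort l = operation_sort_alt l
  -- A's collection loop produces exactly `num l`
  have hnumbered : (PySem.List.pyRange 0 (l.length : Int)).foldl (fun acc i =>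
        (PySem.List.pyRange 0 (opOrder.length : Int)).foldl (fun acc2 j =>
          if PySem.List.pyGetD (PySem.List.pyGetD l i []) 0 "" = PySem.List.pyGetD opOrder j "" then
            acc2 ++ [(j, PySem.List.pyGetD (PySem.List.pyGetD l i []) 1 "")]
          else acc2) acc) [] = num l := by
    rw [PySem.List.foldl_pyRange_zero_pyGetD' l [] (fun acc t =>
          (PySem.List.pyRange 0 (opOrder.length : Int)).foldl (fun acc2 j =>
            if PySem.List.pyGetD t 0 "" = PySem.List.pyGetD opOrder j "" then
              acc2 ++ [(j, PySem.List.pyGetD t 1 "")] else acc2) acc) []]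
    rw [PySem.List.foldl_congr_mem l _ (fun acc t => acc ++ ent t) []
          (fun acc t _ => innerA acc t)]
    rw [PySem.List.foldl_append_eq_flatMap ent l []]
    rfl
  unfold operation_sort operation_sort_alt
  simp only [hnumbered]
  -- B's buckets after the pass
  rw [foldB l [] [] [] [] [] [] [] []]
  simp only [List.nil_append, precB_items, List.flatMap_cons, List.flatMap_nil]
  have hSlen : (PySem.List.sorted (num l) (fun p => (p : Int × String).1)).length = (num l).length :=
    PySem.List.length_sorted _ _ _
  have hle : (PySem.List.sorted (num l) (fun p => (p : Int × String).1)).length ≤ l.length := by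
    rw [hSlen]; exact num_len_le l
  have hw := write_loop (fun p : Int × String => [PySem.List.pyGetD opOrder p.1 "", p.2])
      ((0 : Int), "") (PySem.List.sorted (num l) (fun p => (p : Int × String).1)) l hle
  simp only [] at hw
  rw [hw, hSlen]
  rw [sorted_buckets (num l) (num_key_bound l)]
  simp only [List.map_append]
  rw [map_g_fil 0 "LPAREN" rfl, map_g_fil 1 "RPAREN" rfl, map_g_fil 2 "FACT" rfl,
      map_g_fil 3 "EXPO" rfl, map_g_fil 4 "DIV" rfl, map_g_fil 5 "MUL" rfl,
      map_g_fil 6 "PLUS" rfl, map_g_fil 7 "MINUS" rfl]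
  -- (num l).length equals the total length of the spliced-in tokens
  have hlen : (num l).length =
      ((V 0 l).map (fun v => ["LPAREN", v]) ++ (V 1 l).map (fun v => ["RPAREN", v]) ++
       (V 2 l).map (fun v => ["FACT", v]) ++ (V 3 l).map (fun v => ["EXPO", v]) ++
       (V 4 l).map (fun v => ["DIV", v]) ++ (V 5 l).map (fun v => ["MUL", v]) ++
       (V 6 l).map (fun v => ["PLUS", v]) ++ (V 7 l).map (fun v => ["MINUS", v])).length := by
    have := congrArg List.length (sorted_buckets (num l) (num_key_bound l))
    rw [hSlen] at this
    simpa [V, List.length_append] using this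
  simp only [PySem.List.pyGetD_ofNat', List.getD_cons_zero, List.getD_cons_succ, Int.reduceToNat]
  rw [V, V, V, V, V, V, V, V] at hlen ⊢
  simp only [List.append_assoc, List.append_nil, List.nil_append] at hlen ⊢
  rw [← hlen]
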